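-- pv_equiv track=rewrite | github.com/vamsikrishna07/Amazon-OA | predictDays.py | predictDays
-- ===== SOURCE A (Python) =====
-- def predictDays(arr, k):
--     n = len(arr)
--     if n < 2 * k + 1:
--         return []
--     left = [1] * n
--     for i in range(1, n):
--         if arr[i - 1] >= arr[i]:
--             left[i] = left[i - 1] + 1
--     right = [1] * n
--     for i in range(n - 2, -1, -1):
--         if arr[i] <= arr[i + 1]:
--             right[i] = right[i + 1] + 1
--     result = []
--     for i in range(k, n - k):
--         if left[i] >= k + 1 and right[i] >= k + 1:
--             result.append(i+1)
--     return result
-- ===== SOURCE B (Python) =====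
-- def predictDays(arr, k):
--     n = len(arr)
--     if n < 2 * k + 1:
--         return []
--     result = []
--     for i in range(k, n - k):
--         if all(arr[i - j - 1] >= arr[i - j] for j in range(k)) and \
--            all(arr[i + j] <= arr[i + j + 1] for j in range(k)):
--             result.append(i + 1)
--     return result
-- ===== Notes on version B (the rewrite author's own statement) =====
-- stated objective: simpler
-- what changed: A builds left/right run-length tables in two extra passes and then scans them; B drops the tables entirely and, for each candidate index i in range(k, n-k), directly checks the k non-increasing steps before i and the k non-decreasing steps after i with all(...) over range(k).
import Mathlib
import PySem

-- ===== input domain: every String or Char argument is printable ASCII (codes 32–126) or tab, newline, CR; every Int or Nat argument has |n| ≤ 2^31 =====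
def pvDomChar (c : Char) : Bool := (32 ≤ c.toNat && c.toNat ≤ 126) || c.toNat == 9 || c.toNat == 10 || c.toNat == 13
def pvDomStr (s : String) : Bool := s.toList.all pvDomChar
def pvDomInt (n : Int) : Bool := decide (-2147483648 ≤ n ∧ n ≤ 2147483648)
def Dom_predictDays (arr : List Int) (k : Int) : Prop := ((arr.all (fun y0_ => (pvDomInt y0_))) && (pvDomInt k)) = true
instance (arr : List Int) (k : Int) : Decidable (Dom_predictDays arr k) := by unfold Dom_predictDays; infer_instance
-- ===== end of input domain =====

-- B replaces A's two left/right run-length tables by a direct per-candidate window scan: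
-- simpler (no auxiliary tables), not faster. Return value only; neither version mutates its input.

-- ===== PORT A =====
def predictDays (arr : List Int) (k : Int) : List Int :=
  let n : Int := arr.length
  if n < 2 * k + 1 then []
  else
    let left := (PySem.List.pyRange 1 n 1).foldl
      (fun left i =>
        if PySem.List.pyGetD arr (i - 1) 0 ≥ PySem.List.pyGetD arr i 0 then
          PySem.List.pySetD left i (PySem.List.pyGetD left (i - 1) 0 + 1)
        else left)
      (List.replicate arr.length 1)
    let right := (PySem.List.pyRange (n - 2) (-1) (-1)).foldl
      (fun right i =>
        if PySem.List.pyGetD arr i 0 ≤ PySem.List.pyGetD arr (i + 1) 0 then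
          PySem.List.pySetD right i (PySem.List.pyGetD right (i + 1) 0 + 1)
        else right)
      (List.replicate arr.length 1)
    (PySem.List.pyRange k (n - k) 1).foldl
      (fun result i =>
        if PySem.List.pyGetD left i 0 ≥ k + 1 ∧ PySem.List.pyGetD right i 0 ≥ k + 1 then
          result ++ [i + 1]
        else result)
      []

-- ===== PORT B =====
def predictDays_alt (arr : List Int) (k : Int) : List Int :=
  let n : Int := arr.length
  if n < 2 * k + 1 then []
  else
    (PySem.List.pyRange k (n - k) 1).foldl
      (fun result i =>
        if ((PySem.List.pyRange 0 k 1).all fun j =>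
              PySem.List.pyGetD arr (i - j - 1) 0 ≥ PySem.List.pyGetD arr (i - j) 0) &&
           ((PySem.List.pyRange 0 k 1).all fun j =>
              PySem.List.pyGetD arr (i + j) 0 ≤ PySem.List.pyGetD arr (i + j + 1) 0) then
          result ++ [i + 1]
        else result)
      []

-- ===== PRECONDITION & SPEC =====
-- Pre_ excludes k < 0, on which Python A always raises IndexError in its result loop.
def Pre_predictDays (arr : List Int) (k : Int) : Prop := 0 ≤ k
instance (arr : List Int) (k : Int) : Decidable (Pre_predictDays arr k) := by unfold Pre_predictDays; infer_instance
def pvWitness_predictDays : List Int × Int := ([0, 0, 0], 1)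

def Spec_predictDays (arr : List Int) (k : Int) (out : List Int) : Prop := out = predictDays_alt arr k
instance (arr : List Int) (k : Int) (out : List Int) : Decidable (Spec_predictDays arr k out) := by unfold Spec_predictDays; infer_instance

-- ===== CLAIM (what is proved, stated in full; the proofs are below) =====
def Claim_equal_predictDays : Prop := ∀ (arr : List Int) (k : Int), Dom_predictDays arr k → Pre_predictDays arr k → Spec_predictDays arr k (predictDays arr k)

-- ===== LEMMAS AND PROOFS =====

-- run length of the non-increasing streak of arr ending at index t (A's left[t])
def Lrec (arr : List Int) : Nat → Int
  | 0 => 1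
  | t + 1 => if arr.getD t 0 ≥ arr.getD (t + 1) 0 then Lrec arr t + 1 else 1

-- A's right[arr.length - 1 - d], by distance d from the last index
def Rrec (arr : List Int) : Nat → Int
  | 0 => 1
  | d + 1 => if arr.getD (arr.length - 2 - d) 0 ≤ arr.getD (arr.length - 1 - d) 0 then Rrec arr d + 1 else 1

-- A's left table after the loop has processed i = 1 .. m-1 (defeq to the fold in the port)
def leftTab (arr : List Int) (m : Int) : List Int :=
  (PySem.List.pyRange 1 m 1).foldl
    (fun left i =>
      if PySem.List.pyGetD arr (i - 1) 0 ≥ PySem.List.pyGetD arr i 0 then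
        PySem.List.pySetD left i (PySem.List.pyGetD left (i - 1) 0 + 1)
      else left)
    (List.replicate arr.length 1)

-- A's right table after the loop has processed i = n-2 down to m+1 (defeq to the fold in the port)
def rightTab (arr : List Int) (m : Int) : List Int :=
  (PySem.List.pyRange ((arr.length : Int) - 2) m (-1)).foldl
    (fun right i =>
      if PySem.List.pyGetD arr i 0 ≤ PySem.List.pyGetD arr (i + 1) 0 then
        PySem.List.pySetD right i (PySem.List.pyGetD right (i + 1) 0 + 1)
      else right)
    (List.replicate arr.length 1)

theorem predictDays_eq (arr : List Int) (k : Int) :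
    predictDays arr k =
      if (arr.length : Int) < 2 * k + 1 then []
      else
        (PySem.List.pyRange k ((arr.length : Int) - k) 1).foldl
          (fun result i =>
            if PySem.List.pyGetD (leftTab arr (arr.length : Int)) i 0 ≥ k + 1 ∧
               PySem.List.pyGetD (rightTab arr (-1)) i 0 ≥ k + 1 then
              result ++ [i + 1]
            else result)
          [] := rfl

theorem predictDays_alt_eq (arr : List Int) (k : Int) :
    predictDays_alt arr k =
      if (arr.length : Int) < 2 * k + 1 then []
      else
        (PySem.List.pyRange k ((arr.length : Int) - k) 1).foldl
          (fun result i =>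
            if ((PySem.List.pyRange 0 k 1).all fun j =>
                  PySem.List.pyGetD arr (i - j - 1) 0 ≥ PySem.List.pyGetD arr (i - j) 0) &&
               ((PySem.List.pyRange 0 k 1).all fun j =>
                  PySem.List.pyGetD arr (i + j) 0 ≤ PySem.List.pyGetD arr (i + j + 1) 0) then
              result ++ [i + 1]
            else result)
          [] := rfl

theorem Lrec_pos (arr : List Int) (t : Nat) : 1 ≤ Lrec arr t := by
  cases t with
  | zero => simp [Lrec]
  | succ t =>
    have := Lrec_pos arr t
    simp only [Lrec]; split <;> omega

theorem Rrec_pos (arr : List Int) (d : Nat) : 1 ≤ Rrec arr d := by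
  cases d with
  | zero => simp [Rrec]
  | succ d =>
    have := Rrec_pos arr d
    simp only [Rrec]; split <;> omega

theorem leftTab_succ (arr : List Int) (b : Int) (hb : 1 ≤ b) :
    leftTab arr (b + 1) =
      if PySem.List.pyGetD arr (b - 1) 0 ≥ PySem.List.pyGetD arr b 0 then
        PySem.List.pySetD (leftTab arr b) b (PySem.List.pyGetD (leftTab arr b) (b - 1) 0 + 1)
      else leftTab arr b := by
  unfold leftTab
  rw [PySem.List.pyRange_one_succ_right hb, List.foldl_append]
  simp [List.foldl]

theorem leftTab_spec (arr : List Int) (c : Nat) (hc : c < arr.length) :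
    (leftTab arr (1 + (c : Int))).length = arr.length ∧
    ∀ t : Int, 0 ≤ t → t < arr.length →
      PySem.List.pyGetD (leftTab arr (1 + (c : Int))) t 0 =
        if t ≤ (c : Int) then Lrec arr t.toNat else 1 := by
  induction c with
  | zero =>
    have h1 : leftTab arr (1 + ((0 : Nat) : Int)) = List.replicate arr.length 1 := by
      unfold leftTab
      rw [PySem.List.pyRange_one_eq_nil (by norm_num)]
      rfl
    rw [h1]
    refine ⟨by simp, ?_⟩
    intro t ht0 htn
    lift t to ℕ using ht0 with t'
    rw [PySem.List.pyGetD_natCast]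
    rw [List.getD_eq_getElem _ _ (by simpa using htn)]
    split_ifs with h1
    · have : t' = 0 := by omega
      subst this
      simp [Lrec]
    · simp
  | succ c ih =>
    obtain ⟨ihlen, ihget⟩ := ih (by omega)
    have hb : (1 : Int) + ((c + 1 : Nat) : Int) = (1 + (c : Int)) + 1 := by push_cast; ring
    rw [hb, leftTab_succ arr _ (by omega)]
    have hbm1 : (1 : Int) + (c : Int) - 1 = ((c : Nat) : Int) := by ring
    have hb2 : (1 : Int) + (c : Int) = ((c + 1 : Nat) : Int) := by push_cast; ring
    rw [hbm1]
    rw [hb2] at ihlen ihget ⊢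
    have hgc : PySem.List.pyGetD (leftTab arr ((c + 1 : Nat) : Int)) ((c : Nat) : Int) 0 = Lrec arr c := by
      rw [ihget _ (by omega) (by omega), if_pos (by omega)]
      simp
    rw [hgc]
    rw [PySem.List.pyGetD_natCast, PySem.List.pyGetD_natCast]
    by_cases h : arr.getD c 0 ≥ arr.getD (c + 1) 0
    · rw [if_pos h]
      refine ⟨?_, ?_⟩
      · rw [PySem.List.pySetD_natCast]
        simpa using ihlen
      · intro t ht0 htn
        lift t to ℕ using ht0 with t'
        rw [PySem.List.pyGetD_pySetD_natCast _ _ _ _ _ (by rw [ihlen]; exact hc)]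
        by_cases ht : t' = c + 1
        · subst ht
          rw [if_pos rfl, if_pos (by omega)]
          simp only [Int.toNat_natCast, Lrec]
          rw [if_pos h]
        · rw [if_neg ht]
          rw [ihget _ (by omega) (by omega)]
          split_ifs with h1 h2 h2 <;> first | rfl | omega
    · rw [if_neg h]
      refine ⟨ihlen, ?_⟩
      intro t ht0 htn
      rw [ihget t ht0 htn]
      split_ifs with h1 h2 h2 <;> try rfl
      · omega
      · have : t.toNat = c + 1 := by omega
        rw [this]
        simp only [Lrec]
        rw [if_neg h]

theorem pyRange_neg_one_append (a b : Int) (h : b + 1 ≤ a) :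
    PySem.List.pyRange a b (-1) = PySem.List.pyRange a (b + 1) (-1) ++ [b + 1] := by
  rw [PySem.List.pyRange_neg_one_eq_reverse, PySem.List.pyRange_neg_one_eq_reverse,
      PySem.List.pyRange_one_cons (by omega : b + 1 < a + 1)]
  simp

theorem rightTab_succ (arr : List Int) (b : Int) (hb : b + 1 ≤ (arr.length : Int) - 2) :
    rightTab arr b =
      if PySem.List.pyGetD arr (b + 1) 0 ≤ PySem.List.pyGetD arr (b + 1 + 1) 0 then
        PySem.List.pySetD (rightTab arr (b + 1)) (b + 1)
          (PySem.List.pyGetD (rightTab arr (b + 1)) (b + 1 + 1) 0 + 1)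
      else rightTab arr (b + 1) := by
  unfold rightTab
  rw [pyRange_neg_one_append _ _ hb, List.foldl_append]
  simp [List.foldl]

theorem rightTab_spec (arr : List Int) (c : Nat) (hc : (c : Int) ≤ (arr.length : Int) - 1) :
    (rightTab arr ((arr.length : Int) - 2 - c)).length = arr.length ∧
    ∀ t : Int, 0 ≤ t → t < arr.length →
      PySem.List.pyGetD (rightTab arr ((arr.length : Int) - 2 - c)) t 0 =
        if (arr.length : Int) - 1 - c ≤ t then Rrec arr ((arr.length : Int) - 1 - t).toNat else 1 := by
  induction c with
  | zero =>
    have h1 : rightTab arr ((arr.length : Int) - 2 - ((0 : Nat) : Int)) = List.replicate arr.length 1 := by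
      unfold rightTab
      rw [PySem.List.pyRange_neg_one_eq_nil (by omega)]
      rfl
    rw [h1]
    refine ⟨by simp, ?_⟩
    intro t ht0 htn
    lift t to ℕ using ht0 with t'
    rw [PySem.List.pyGetD_natCast]
    rw [List.getD_eq_getElem _ _ (by simpa using htn)]
    split_ifs with h1
    · have : ((arr.length : Int) - 1 - t').toNat = 0 := by omega
      rw [this]
      simp [Rrec]
    · simp
  | succ c ih =>
    have hlen : c + 2 ≤ arr.length := by omega
    obtain ⟨ihlen, ihget⟩ := ih (by omega)
    have e0 : (arr.length : Int) - 2 - ((c + 1 : Nat) : Int) + 1 = (arr.length : Int) - 2 - c := by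
      push_cast; ring
    rw [rightTab_succ arr _ (by omega), e0]
    have e1 : (arr.length : Int) - 2 - (c : Int) = ((arr.length - 2 - c : Nat) : Int) := by
      omega
    have hv : PySem.List.pyGetD (rightTab arr ((arr.length : Int) - 2 - (c : Int)))
        ((arr.length : Int) - 2 - (c : Int) + 1) 0 = Rrec arr c := by
      rw [ihget _ (by omega) (by omega), if_pos (by omega)]
      have : ((arr.length : Int) - 1 - ((arr.length : Int) - 2 - (c : Int) + 1)).toNat = c := by omega
      rw [this]
    rw [hv]
    rw [show ((arr.length : Int) - 2 - (c : Int)) = ((arr.length - 2 - c : Nat) : Int) from e1]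
    have e3 : ((arr.length - 2 - c : Nat) : Int) + 1 = ((arr.length - 1 - c : Nat) : Int) := by
      omega
    rw [e3]
    rw [e1] at ihlen ihget
    rw [PySem.List.pyGetD_natCast, PySem.List.pyGetD_natCast]
    by_cases h : arr.getD (arr.length - 2 - c) 0 ≤ arr.getD (arr.length - 1 - c) 0
    · rw [if_pos h]
      refine ⟨?_, ?_⟩
      · rw [PySem.List.pySetD_natCast]
        simpa using ihlen
      · intro t ht0 htn
        lift t to ℕ using ht0 with t'
        rw [PySem.List.pyGetD_pySetD_natCast _ _ _ _ _ (by rw [ihlen]; omega)]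
        by_cases ht : t' = arr.length - 2 - c
        · rw [if_pos ht, if_pos (by omega)]
          have h4 : ((arr.length : Int) - 1 - (t' : Int)).toNat = c + 1 := by omega
          rw [h4]
          rw [show Rrec arr (c + 1) = Rrec arr c + 1 from by simp only [Rrec]; rw [if_pos h]]
        · rw [if_neg ht, ihget _ (by omega) (by omega)]
          split_ifs with h1 h2 h2 <;> first | rfl | omega
    · rw [if_neg h]
      refine ⟨ihlen, ?_⟩
      intro t ht0 htn
      rw [ihget t ht0 htn]
      split_ifs with h1 h2 h2 <;> try rfl
      · omega
      · have h4 : ((arr.length : Int) - 1 - t).toNat = c + 1 := by omega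
        rw [h4]
        simp only [Rrec]
        rw [if_neg h]

theorem Lchar (arr : List Int) : ∀ (i m : Nat), m ≤ i →
    ((m : Int) + 1 ≤ Lrec arr i ↔
      ∀ j : Nat, j < m → arr.getD (i - j - 1) 0 ≥ arr.getD (i - j) 0) := by
  intro i
  induction i with
  | zero =>
    intro m hm
    interval_cases m
    simp [Lrec]
  | succ i ih =>
    intro m hm
    cases m with
    | zero =>
      have := Lrec_pos arr (i + 1)
      simp; omega
    | succ m' =>
      simp only [Lrec]
      split
      · rename_i hcond
        have h1 : ((m' : Int) + 1 + 1 ≤ Lrec arr i + 1) ↔ ((m' : Int) + 1 ≤ Lrec arr i) := by omega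
        have h2 := ih m' (by omega)
        push_cast
        rw [h1, h2]
        constructor
        · intro h j hj
          cases j with
          | zero => simpa using hcond
          | succ j' =>
            have := h j' (by omega)
            have e1 : i + 1 - (j' + 1) - 1 = i - j' - 1 := by omega
            have e2 : i + 1 - (j' + 1) = i - j' := by omega
            rw [e1, e2]; exact this
        · intro h j hj
          have := h (j + 1) (by omega)
          have e1 : i + 1 - (j + 1) - 1 = i - j - 1 := by omega
          have e2 : i + 1 - (j + 1) = i - j := by omega
          rw [e1, e2] at this; exact this
      · rename_i hcond
        constructor
        · intro h; omega
        · intro h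
          exfalso
          have := h 0 (by omega)
          simp at this
          exact hcond this

theorem Rchar (arr : List Int) : ∀ (d m : Nat), m ≤ d → d + 1 ≤ arr.length →
    ((m : Int) + 1 ≤ Rrec arr d ↔
      ∀ j : Nat, j < m → arr.getD (arr.length - 1 - d + j) 0 ≤ arr.getD (arr.length - 1 - d + j + 1) 0) := by
  intro d
  induction d with
  | zero =>
    intro m hm _
    interval_cases m
    simp [Rrec]
  | succ d ih =>
    intro m hm hd
    cases m with
    | zero =>
      have := Rrec_pos arr (d + 1)
      simp; omega
    | succ m' =>
      simp only [Rrec]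
      split
      · rename_i hcond
        have h1 : ((m' : Int) + 1 + 1 ≤ Rrec arr d + 1) ↔ ((m' : Int) + 1 ≤ Rrec arr d) := by omega
        have h2 := ih m' (by omega) (by omega)
        push_cast
        rw [h1, h2]
        constructor
        · intro h j hj
          cases j with
          | zero =>
            have e1 : arr.length - 1 - (d + 1) + 0 = arr.length - 2 - d := by omega
            rw [e1, show arr.length - 2 - d + 1 = arr.length - 1 - d from by omega]
            exact hcond
          | succ j' =>
            have := h j' (by omega)
            have e1 : arr.length - 1 - (d + 1) + (j' + 1) = arr.length - 1 - d + j' := by omega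
            rw [e1]; exact this
        · intro h j hj
          have := h (j + 1) (by omega)
          have e1 : arr.length - 1 - (d + 1) + (j + 1) = arr.length - 1 - d + j := by omega
          rw [e1] at this; exact this
      · rename_i hcond
        constructor
        · intro h; omega
        · intro h
          exfalso
          have := h 0 (by omega)
          have e1 : arr.length - 1 - (d + 1) + 0 = arr.length - 2 - d := by omega
          rw [e1, show arr.length - 2 - d + 1 = arr.length - 1 - d from by omega] at this
          exact hcond this

-- ===== VERDICT (by name: the statement is the Claim_ definition above) =====
theorem predictDays_spec : Claim_equal_predictDays := by
  intro arr k _ hk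
  unfold Pre_predictDays at hk
  unfold Spec_predictDays
  rw [predictDays_eq, predictDays_alt_eq]
  by_cases hn : (arr.length : Int) < 2 * k + 1
  · rw [if_pos hn, if_pos hn]
  · rw [if_neg hn, if_neg hn]
    have hlen1 : 1 ≤ arr.length := by omega
    obtain ⟨hLlen, hLget⟩ := leftTab_spec arr (arr.length - 1) (by omega)
    rw [show (1 : Int) + ((arr.length - 1 : Nat) : Int) = (arr.length : Int) from by omega] at hLlen hLget
    obtain ⟨hRlen, hRget⟩ := rightTab_spec arr (arr.length - 1) (by omega)
    rw [show (arr.length : Int) - 2 - ((arr.length - 1 : Nat) : Int) = (-1 : Int) from by omega] at hRlen hRget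
    apply PySem.List.foldl_congr_mem
    intro acc i hi
    rw [PySem.List.mem_pyRange_one] at hi
    obtain ⟨hik, hin⟩ := hi
    have hL : PySem.List.pyGetD (leftTab arr (arr.length : Int)) i 0 = Lrec arr i.toNat := by
      rw [hLget i (by omega) (by omega), if_pos (by omega)]
    have hR : PySem.List.pyGetD (rightTab arr (-1)) i 0 =
        Rrec arr ((arr.length : Int) - 1 - i).toNat := by
      rw [hRget i (by omega) (by omega), if_pos (by omega)]
    have hiffL : (k + 1 ≤ Lrec arr i.toNat) ↔
        (∀ j : Int, 0 ≤ j → j < k →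
          PySem.List.pyGetD arr (i - j) 0 ≤ PySem.List.pyGetD arr (i - j - 1) 0) := by
      have hchar := Lchar arr i.toNat k.toNat (by omega)
      rw [Int.toNat_of_nonneg hk] at hchar
      rw [hchar]
      constructor
      · intro h j hj0 hjk
        have e1 : i - j - 1 = ((i.toNat - j.toNat - 1 : Nat) : Int) := by omega
        have e2 : i - j = ((i.toNat - j.toNat : Nat) : Int) := by omega
        rw [e1, e2, PySem.List.pyGetD_natCast, PySem.List.pyGetD_natCast]
        exact h j.toNat (by omega)
      · intro h j hj
        have := h (j : Int) (by omega) (by omega)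
        have e1 : i - (j : Int) - 1 = ((i.toNat - j - 1 : Nat) : Int) := by omega
        have e2 : i - (j : Int) = ((i.toNat - j : Nat) : Int) := by omega
        rw [e1, e2, PySem.List.pyGetD_natCast, PySem.List.pyGetD_natCast] at this
        exact this
    have hiffR : (k + 1 ≤ Rrec arr ((arr.length : Int) - 1 - i).toNat) ↔
        (∀ j : Int, 0 ≤ j → j < k →
          PySem.List.pyGetD arr (i + j) 0 ≤ PySem.List.pyGetD arr (i + j + 1) 0) := by
      have hchar := Rchar arr ((arr.length : Int) - 1 - i).toNat k.toNat (by omega) (by omega)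
      rw [Int.toNat_of_nonneg hk] at hchar
      rw [show arr.length - 1 - ((arr.length : Int) - 1 - i).toNat = i.toNat from by omega] at hchar
      rw [hchar]
      constructor
      · intro h j hj0 hjk
        have e1 : i + j = ((i.toNat + j.toNat : Nat) : Int) := by omega
        have e2 : i + j + 1 = ((i.toNat + j.toNat + 1 : Nat) : Int) := by omega
        rw [e2, e1, PySem.List.pyGetD_natCast, PySem.List.pyGetD_natCast]
        exact h j.toNat (by omega)
      · intro h j hj
        have := h (j : Int) (by omega) (by omega)
        have e1 : i + (j : Int) = ((i.toNat + j : Nat) : Int) := by omega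
        have e2 : i + (j : Int) + 1 = ((i.toNat + j + 1 : Nat) : Int) := by omega
        rw [e2, e1, PySem.List.pyGetD_natCast, PySem.List.pyGetD_natCast] at this
        exact this
    refine if_congr ?_ rfl rfl
    rw [hL, hR]
    simp only [Bool.and_eq_true, List.all_eq_true, PySem.List.mem_pyRange_one,
      decide_eq_true_eq, and_imp, ge_iff_le]
    constructor
    · rintro ⟨h1, h2⟩
      exact ⟨fun j hj0 hjk => hiffL.mp h1 j hj0 hjk, fun j hj0 hjk => hiffR.mp h2 j hj0 hjk⟩
    · rintro ⟨h1, h2⟩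
      exact ⟨hiffL.mpr fun j hj0 hjk => h1 j hj0 hjk, hiffR.mpr fun j hj0 hjk => h2 j hj0 hjk⟩
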